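-- pv_equiv track=rewrite | github.com/sangjun0412/codingTest_base | Total_Algorithm/(PGS)귤고르기.py | solution
-- ===== SOURCE A (Python) =====
-- def solution(k, tangerine):
--     answer = 0
--     dic = {}
--     check = [0] * (10000001)
--     for x in tangerine:
--         if not check[x]:
--             check[x] = 1
--             dic[x] = 1
--         else:
--             dic[x] += 1
--     dic = sorted(dic.items(), key=lambda x: x[1], reverse=True)
--     for key, v in dic:
--         answer += 1
--         k -= v
--         if k <= 0:
--             break
--
--     return answer
-- ===== SOURCE B (Python) =====
-- def solution(k, tangerine):
--     # Count each kind, then bucket kinds by frequency and sweep frequencies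
--     # from the maximum down; no 10-million-slot table, no comparison sort.
--     freq = {}
--     for x in tangerine:
--         freq[x] = freq.get(x, 0) + 1
--     bucket = {}
--     maxf = 0
--     for c in freq.values():
--         bucket[c] = bucket.get(c, 0) + 1
--         if c > maxf:
--             maxf = c
--     answer = 0
--     f = maxf
--     while f >= 1:
--         for _ in range(bucket.get(f, 0)):
--             answer += 1
--             k -= f
--             if k <= 0:
--                 return answer
--         f -= 1
--     return answer
-- ===== Notes on version B (the rewrite author's own statement) =====
-- stated objective: faster
-- what changed: Replaces A's 10000001-slot presence table plus comparison sort of the count dict by a single counting pass, a frequency-of-frequency bucket table, and a counting-sort-style sweep from the highest frequency down.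
import Mathlib
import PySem

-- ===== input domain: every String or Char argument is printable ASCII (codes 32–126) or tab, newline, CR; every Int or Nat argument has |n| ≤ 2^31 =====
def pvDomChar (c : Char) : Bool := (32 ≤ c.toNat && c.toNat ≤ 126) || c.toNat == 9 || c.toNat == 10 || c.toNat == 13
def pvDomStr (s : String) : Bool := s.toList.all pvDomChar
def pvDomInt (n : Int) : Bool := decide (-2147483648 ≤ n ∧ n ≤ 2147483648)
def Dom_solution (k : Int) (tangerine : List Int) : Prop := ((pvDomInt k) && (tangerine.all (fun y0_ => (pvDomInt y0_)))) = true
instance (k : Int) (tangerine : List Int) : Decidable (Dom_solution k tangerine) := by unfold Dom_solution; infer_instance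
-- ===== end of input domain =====

-- B replaces A's 10000001-slot presence table and comparison sort by a counting pass
-- plus a frequency-bucket sweep from the highest count down (objective: faster).

-- ===== PORT A =====
-- Python indexes `check[x]` with possible negative wraparound: index x reads slot
-- x + 10000001 when x < 0.  Out-of-range x raises IndexError, excluded by Pre_.
def chkIdx (x : Int) : Int := if x < 0 then x + 10000001 else x

-- one iteration of A's counting loop over (dic, check); exact on Pre_ (outside Pre_
-- Python raises IndexError/KeyError, where the total getD/setIfInBounds forms differ)
def stepA (st : PySem.Dict Int Int × Array Int) (x : Int) : PySem.Dict Int Int × Array Int :=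
  if st.2.getD (chkIdx x).toNat 0 = 0 then          -- `if not check[x]`
    (st.1.insert x 1, st.2.setIfInBounds (chkIdx x).toNat 1)   -- check[x] = 1; dic[x] = 1
  else
    (st.1.insert x (st.1.getD x 0 + 1), st.2)       -- dic[x] += 1

-- `for key, v in dic: answer += 1; k -= v; if k <= 0: break`
def loopA (k answer : Int) : List (Int × Int) → Int
  | [] => answer
  | (_, v) :: rest =>
    let answer := answer + 1
    let k := k - v
    if k ≤ 0 then answer else loopA k answer rest

def solution (k : Int) (tangerine : List Int) : Int :=
  let answer : Int := 0
  let st := tangerine.foldl stepA (PySem.Dict.empty, Array.replicate 10000001 0)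
  let dic := PySem.List.sorted st.1.items (fun p => p.2) true
  loopA k answer dic

-- ===== PORT B =====
-- `for _ in range(bucket.get(f, 0)): answer += 1; k -= f; if k <= 0: return answer`
def innerB (f : Int) : Nat → Int → Int → Sum Int (Int × Int)
  | 0, k, answer => .inr (k, answer)
  | n + 1, k, answer =>
    let answer := answer + 1
    let k := k - f
    if k ≤ 0 then .inl answer else innerB f n k answer

-- `while f >= 1: …; f -= 1`  (runs exactly maxf.toNat times; fuel = maxf.toNat)
def loopB (bucket : PySem.Dict Int Int) : Nat → Int → Int → Int → Int
  | 0, _, _, answer => answer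
  | fuel + 1, f, k, answer =>
    match innerB f (bucket.getD f 0).toNat k answer with
    | .inl answer => answer
    | .inr (k, answer) => loopB bucket fuel (f - 1) k answer

def solution_alt (k : Int) (tangerine : List Int) : Int :=
  let freq := tangerine.foldl (fun d x => d.insert x (d.getD x 0 + 1)) PySem.Dict.empty
  let bm := freq.values.foldl
    (fun (p : PySem.Dict Int Int × Int) c =>
      (p.1.insert c (p.1.getD c 0 + 1), if c > p.2 then c else p.2))
    (PySem.Dict.empty, 0)
  loopB bm.1 bm.2.toNat bm.2 k 0

-- ===== PRECONDITION & SPEC =====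
-- Pre_ excludes exactly the inputs where A raises: an element outside the index range
-- of A's 10000001-slot table (IndexError), or two distinct elements x, y with
-- x - y = 10000001, which share a slot after negative-index wraparound (KeyError).
def Pre_solution (k : Int) (tangerine : List Int) : Prop :=
  (∀ x ∈ tangerine, -10000001 ≤ x ∧ x ≤ 10000000) ∧
  (∀ x ∈ tangerine, ∀ y ∈ tangerine, x - y ≠ 10000001)
instance (k : Int) (tangerine : List Int) : Decidable (Pre_solution k tangerine) := by
  unfold Pre_solution; infer_instance

def pvWitness_solution : Int × List Int := (6, [3, -2, 3, 3, -2, 7])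

def Spec_solution (k : Int) (tangerine : List Int) (out : Int) : Prop := out = solution_alt k tangerine
instance (k : Int) (tangerine : List Int) (out : Int) : Decidable (Spec_solution k tangerine out) := by unfold Spec_solution; infer_instance

-- ===== CLAIM (what is proved, stated in full; the proofs are below) =====
def Claim_equal_solution : Prop := ∀ (k : Int) (tangerine : List Int), Dom_solution k tangerine → Pre_solution k tangerine → Spec_solution k tangerine (solution k tangerine)

-- ===== LEMMAS AND PROOFS =====

-- A's pair loop consumes only the second components
def consume (k answer : Int) : List Int → Int
  | [] => answer
  | v :: rest =>
    if k - v ≤ 0 then answer + 1 else consume (k - v) (answer + 1) rest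

lemma loopA_eq_consume (ps : List (Int × Int)) : ∀ k answer,
    loopA k answer ps = consume k answer (ps.map Prod.snd) := by
  induction ps with
  | nil => intro k a; rfl
  | cons p rest ih =>
    intro k a
    simp only [loopA, consume, List.map]
    split_ifs <;> simp [ih]

-- the descending value sequence B's sweep consumes
def sweepL (bucket : PySem.Dict Int Int) : Nat → Int → List Int
  | 0, _ => []
  | fuel + 1, f => List.replicate (bucket.getD f 0).toNat f ++ sweepL bucket fuel (f - 1)

lemma innerB_consume (f : Int) : ∀ (cnt : Nat) (k answer : Int) (tail : List Int),
    (match innerB f cnt k answer with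
      | .inl a => a
      | .inr (k', a') => consume k' a' tail) =
    consume k answer (List.replicate cnt f ++ tail) := by
  intro cnt
  induction cnt with
  | zero => intro k a tail; rfl
  | succ n ih =>
    intro k a tail
    simp only [innerB, List.replicate, consume, List.cons_append]
    split_ifs <;> simp [ih]

lemma loopB_eq_consume (bucket : PySem.Dict Int Int) : ∀ (fuel : Nat) (f k answer : Int),
    loopB bucket fuel f k answer = consume k answer (sweepL bucket fuel f) := by
  intro fuel
  induction fuel with
  | zero => intro f k a; rfl
  | succ n ih =>
    intro f k a
    simp only [loopB, sweepL]
    rw [← innerB_consume f (bucket.getD f 0).toNat k a (sweepL bucket n (f - 1))]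
    cases h : innerB f (bucket.getD f 0).toNat k a with
    | inl a' => rfl
    | inr p => cases p; simp [ih]

-- A's counting loop builds the same dict as B's, given Pre_ (the check table is a
-- faithful presence bit for every still-to-be-seen element)
lemma foldA_fst (xs : List Int) : ∀ (d : PySem.Dict Int Int) (c : Array Int),
    c.size = 10000001 →
    (∀ x ∈ xs, -10000001 ≤ x ∧ x ≤ 10000000) →
    (∀ x ∈ xs, ∀ y ∈ xs, chkIdx x = chkIdx y → x = y) →
    (∀ x ∈ xs, (c.getD (chkIdx x).toNat 0 = 0 ↔ d.contains x = false)) →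
    (xs.foldl stepA (d, c)).1 = xs.foldl (fun d x => d.insert x (d.getD x 0 + 1)) d := by
  induction xs with
  | nil => intro d c _ _ _ _; rfl
  | cons x xs ih =>
    intro d c hsize hr hpw hinv
    have hx := hr x List.mem_cons_self
    have hxb : 0 ≤ chkIdx x ∧ chkIdx x ≤ 10000000 := by unfold chkIdx; split_ifs <;> omega
    simp only [List.foldl_cons]
    by_cases h0 : c.getD (chkIdx x).toNat 0 = 0
    · have hcon : d.contains x = false := (hinv x List.mem_cons_self).1 h0
      have hg : d.insert x (d.getD x 0 + 1) = d.insert x 1 := by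
        rw [PySem.Dict.getD_of_not_contains d 0 hcon]; norm_num
      rw [show stepA (d, c) x = (d.insert x 1, c.setIfInBounds (chkIdx x).toNat 1) from
            by simp only [stepA, if_pos h0], hg]
      apply ih
      · simp [Array.size_setIfInBounds, hsize]
      · exact fun y hy => hr y (List.mem_cons_of_mem _ hy)
      · exact fun a ha b hb => hpw a (List.mem_cons_of_mem _ ha) b (List.mem_cons_of_mem _ hb)
      · intro y hy
        by_cases hxy : chkIdx y = chkIdx x
        · have hyx : y = x := hpw y (List.mem_cons_of_mem _ hy) x List.mem_cons_self hxy
          subst hyx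
          have hget : (c.setIfInBounds (chkIdx y).toNat 1).getD (chkIdx y).toNat 0 = 1 := by
            have hlt : (chkIdx y).toNat < c.size := by omega
            rw [Array.getD_eq_getD_getElem?, Array.getElem?_setIfInBounds]
            simp [hlt]
          simp [hget, PySem.Dict.contains_insert_self]
        · have hyb := hr y (List.mem_cons_of_mem _ hy)
          have hyb2 : 0 ≤ chkIdx y := by unfold chkIdx; split_ifs <;> omega
          have hyx : y ≠ x := fun h => hxy (by rw [h])
          have hidx : (chkIdx x).toNat ≠ (chkIdx y).toNat := by omega
          have hget : (c.setIfInBounds (chkIdx x).toNat 1).getD (chkIdx y).toNat 0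
              = c.getD (chkIdx y).toNat 0 := by
            rw [Array.getD_eq_getD_getElem?, Array.getElem?_setIfInBounds,
               Array.getD_eq_getD_getElem?]
            simp [hidx]
          rw [hget, PySem.Dict.contains_insert]
          simpa [hyx] using hinv y (List.mem_cons_of_mem _ hy)
    · have hcon : d.contains x = true := by
        cases hdc : d.contains x with
        | false => exact absurd ((hinv x List.mem_cons_self).2 hdc) h0
        | true => rfl
      rw [show stepA (d, c) x = (d.insert x (d.getD x 0 + 1), c) from by simp only [stepA, if_neg h0]]
      apply ih
      · exact hsize
      · exact fun y hy => hr y (List.mem_cons_of_mem _ hy)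
      · exact fun a ha b hb => hpw a (List.mem_cons_of_mem _ ha) b (List.mem_cons_of_mem _ hb)
      · intro y hy
        rw [PySem.Dict.contains_insert]
        rcases eq_or_ne y x with rfl | hyx
        · exact ⟨fun hc => absurd hc h0, fun hfalse => by simp at hfalse⟩
        · simpa [hyx] using hinv y (List.mem_cons_of_mem _ hy)

-- sweepL counts
lemma count_sweepL (bucket : PySem.Dict Int Int) : ∀ (fuel : Nat) (f v : Int),
    (sweepL bucket fuel f).count v =
      if f - fuel < v ∧ v ≤ f then (bucket.getD v 0).toNat else 0 := by
  intro fuel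
  induction fuel with
  | zero =>
    intro f v
    simp only [sweepL, List.count_nil]
    split_ifs with h
    · omega
    · rfl
  | succ n ih =>
    intro f v
    simp only [sweepL, List.count_append, List.count_replicate, ih]
    rcases eq_or_ne f v with h | h
    · subst h
      simp only [beq_self_eq_true, if_true]
      split_ifs <;> omega
    · rw [if_neg (by simpa using h)]
      split_ifs <;> omega

lemma sweepL_sorted (bucket : PySem.Dict Int Int) : ∀ (fuel : Nat) (f : Int),
    (∀ x ∈ sweepL bucket fuel f, x ≤ f) ∧ (sweepL bucket fuel f).Pairwise (· ≥ ·) := by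
  intro fuel
  induction fuel with
  | zero => intro f; exact ⟨by simp [sweepL], by simp [sweepL]⟩
  | succ n ih =>
    intro f
    obtain ⟨hle, hpw⟩ := ih (f - 1)
    constructor
    · intro x hx
      simp only [sweepL, List.mem_append] at hx
      rcases hx with hx | hx
      · rw [List.eq_of_mem_replicate hx]
      · exact le_trans (hle x hx) (by omega)
    · simp only [sweepL]
      rw [List.pairwise_append]
      refine ⟨?_, hpw, ?_⟩
      · rw [List.pairwise_replicate]; right; exact le_refl f
      · intro a ha b hb
        rw [List.eq_of_mem_replicate ha]
        exact le_trans (hle b hb) (by omega)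

-- ===== VERDICT (by name: the statement is the Claim_ definition above) =====
theorem solution_spec : Claim_equal_solution := by
  intro k t hdom hpre
  unfold Spec_solution
  obtain ⟨hr, hcol⟩ := hpre
  have hpw : ∀ x ∈ t, ∀ y ∈ t, chkIdx x = chkIdx y → x = y := by
    intro x hx y hy hxy
    have hbx := hr x hx
    have hby := hr y hy
    have h1 := hcol x hx y hy
    have h2 := hcol y hy x hx
    unfold chkIdx at hxy
    split_ifs at hxy <;> omega
  have hfold : (t.foldl stepA (PySem.Dict.empty, Array.replicate 10000001 0)).1
      = PySem.Dict.counter t := by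
    rw [foldA_fst t PySem.Dict.empty _ (by simp) hr hpw ?_]
    · exact PySem.Dict.foldl_insert_getD_add_one_eq_counter t
    · intro x hx
      constructor
      · intro _; simp [pysem]
      · intro _
        rw [Array.getD_eq_getD_getElem?]
        rcases lt_or_ge (chkIdx x).toNat 10000001 with h | h
        · simp [h]
        · simp [Nat.not_lt.mpr h]
  simp only [solution, solution_alt]
  rw [hfold, PySem.Dict.foldl_insert_getD_add_one_eq_counter,
      PySem.List.foldl_prod_mk (fun (d : PySem.Dict Int Int) (c : Int) => d.insert c (d.getD c 0 + 1)) (fun (m c : Int) => if c > m then c else m)]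
  rw [PySem.Dict.foldl_insert_getD_add_one_eq_counter]
  have hmaxeq : ((PySem.Dict.counter t).values).foldl
      (fun m c => if c > m then c else m) 0
      = ((PySem.Dict.counter t).values).foldl max 0 := by
    congr 1
    funext m c
    rw [max_def]
    split_ifs <;> omega
  rw [hmaxeq]
  set vals := (PySem.Dict.counter t).values with hvals
  set M := vals.foldl max 0 with hM
  have hM0 : (0 : Int) ≤ M := (PySem.List.le_foldl_max vals 0).1
  have hMub : ∀ v ∈ vals, v ≤ M := (PySem.List.le_foldl_max vals 0).2
  have hpos : ∀ v ∈ vals, 0 < v := by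
    intro v hv
    have : vals = (PySem.Set.ofList t).map (fun a => ((t.count a : Int))) := by
      rw [hvals]
      show (PySem.Dict.counter t).items.map Prod.snd = _
      rw [PySem.Dict.items_counter, List.map_map]
      rfl
    rw [this] at hv
    obtain ⟨a, ha, rfl⟩ := List.mem_map.mp hv
    have : a ∈ t := (PySem.Set.mem_ofList _ _).mp ha
    exact_mod_cast List.count_pos_iff.mpr this
  rw [loopA_eq_consume, loopB_eq_consume]
  congr 1
  have hperm1 : ((PySem.List.sorted (PySem.Dict.counter t).items (fun p => p.2) true).map
      Prod.snd).Perm vals := by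
    rw [hvals]
    exact (PySem.List.sorted_perm (PySem.Dict.counter t).items (fun p => p.2) true).map Prod.snd
  have hperm2 : vals.Perm (sweepL (PySem.Dict.counter vals) M.toNat M) := by
    rw [List.perm_iff_count]
    intro v
    rw [count_sweepL, Int.toNat_of_nonneg hM0]
    by_cases hcond : M - M < v ∧ v ≤ M
    · rw [if_pos hcond, PySem.Dict.getD_counter]
      simp
    · rw [if_neg hcond]
      rw [List.count_eq_zero]
      intro hv
      exact hcond ⟨by have := hpos v hv; omega, hMub v hv⟩
  have hs1 : ((PySem.List.sorted (PySem.Dict.counter t).items (fun p => p.2) true).map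
      Prod.snd).Pairwise (fun a b => b ≤ a) :=
    List.pairwise_map.mpr (PySem.List.sorted_pairwise_rev (PySem.Dict.counter t).items (fun p => p.2))
  have hs2 : (sweepL (PySem.Dict.counter vals) M.toNat M).Pairwise (fun a b => b ≤ a) :=
    (sweepL_sorted (PySem.Dict.counter vals) M.toNat M).2.imp (fun h => h)
  exact PySem.List.eq_of_perm_of_pairwise_le_of_injective (fun v : Int => -v)
    neg_injective (hperm1.trans hperm2)
    (hs1.imp (fun h => neg_le_neg h)) (hs2.imp (fun h => neg_le_neg h))
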